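-- pv_equiv track=rewrite | github.com/bridgette/Python100 | pearls.py | Pearls
-- ===== SOURCE A (Python) =====
-- import heapq
--
-- def Pearls(n, pearl_cost):
--     '''
--     n: number of  on the string
--     pearl_cost: list of ints representing cost of joining pearls
--
--     It always makes sense to merge the two smallest pearls on the string
--     '''
--     running_cost = 0
--     heapq.heapify(pearl_cost)
--
--     while n > 1:
--         i = heapq.heappop(pearl_cost)
--         j = heapq.heappop(pearl_cost)
--         running_cost = running_cost + i + j
--         heapq.heappush(pearl_cost, i + j)
--         n = n - 1
--
--     return running_cost % (10 ** 9 + 7)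
-- ===== SOURCE B (Python) =====
-- def Pearls(n, pearl_cost):
--     # Sorted-list Huffman sweep: sort once, then repeatedly take the two
--     # smallest from the front and splice their sum back in order.
--     # (Does not mutate pearl_cost, unlike the heapq original.)
--     pearls = sorted(pearl_cost)
--     total = 0
--     while n > 1:
--         s = pearls[0] + pearls[1]
--         total += s
--         rest = pearls[2:]
--         k = 0
--         while k < len(rest) and rest[k] < s:
--             k += 1
--         pearls = rest[:k] + [s] + rest[k:]
--         n -= 1
--     return total % (10 ** 9 + 7)
-- ===== Notes on version B (the rewrite author's own statement) =====
-- stated objective: alternative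
-- what changed: Replaces the binary heap (heapify/heappop/heappush) with a single list sorted once up front, from which the two smallest are taken at the head and their sum is spliced back at its ordered position each round; A mutates pearl_cost in place via heapq while B leaves it untouched (equivalence is about the return value).
import Mathlib
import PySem

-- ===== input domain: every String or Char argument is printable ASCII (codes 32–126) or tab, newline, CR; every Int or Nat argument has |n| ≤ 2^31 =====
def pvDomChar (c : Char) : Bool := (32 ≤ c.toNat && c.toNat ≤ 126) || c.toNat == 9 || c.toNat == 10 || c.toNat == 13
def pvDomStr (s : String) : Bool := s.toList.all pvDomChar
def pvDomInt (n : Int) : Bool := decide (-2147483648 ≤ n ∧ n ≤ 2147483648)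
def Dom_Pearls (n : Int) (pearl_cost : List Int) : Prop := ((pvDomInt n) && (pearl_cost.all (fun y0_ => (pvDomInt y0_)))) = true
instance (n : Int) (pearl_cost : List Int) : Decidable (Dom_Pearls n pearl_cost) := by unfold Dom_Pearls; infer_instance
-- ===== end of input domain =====

-- B replaces A's binary heap by a once-sorted list with ordered re-insertion of each sum
-- (an alternative data structure; quadratic in the worst case, so not faster than A);
-- A mutates pearl_cost in place via heapq while B does not — the equivalence proved
-- here is about the RETURN value only.

-- ===== PORT A =====
-- heapq is modelled by its contract: the heap list stands for its multiset of elements,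
-- heappop returns the minimum (exactly what heapq.heappop returns) and removes one copy,
-- heappush adds the element.  This is exact for A's RETURN value, which depends only on
-- the multiset held by the heap, not on its internal array layout.
def pearlsPopMin (heap : List Int) : Option (Int × List Int) :=
  match heap.min? with
  | none => none
  | some m => some (m, heap.erase m)

-- 'while n > 1' with 'n = n - 1' each pass runs (n-1).toNat times
def pearlsLoopA : Nat → List Int → Int → Int
  | 0, _, rc => rc
  | k+1, heap, rc =>
    match pearlsPopMin heap with
    | none => 0      -- heappop of an empty heap: IndexError, excluded by Pre_
    | some (i, h1) =>
      match pearlsPopMin h1 with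
      | none => 0    -- second heappop underflow: IndexError, excluded by Pre_
      | some (j, h2) => pearlsLoopA k ((i + j) :: h2) (rc + i + j)

def Pearls (n : Int) (pearl_cost : List Int) : Int :=
  PySem.Int.mod (pearlsLoopA (n - 1).toNat pearl_cost 0) (10 ^ 9 + 7)

-- ===== PORT B =====
-- the inner 'while k < len(rest) and rest[k] < s: k += 1' scan
def pearlsInsPos : List Int → Int → Nat
  | [], _ => 0
  | x :: r, s => if x < s then pearlsInsPos r s + 1 else 0

-- 'while n > 1' with 'n -= 1' each pass runs (n-1).toNat times
def pearlsLoopB : Nat → List Int → Int → Int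
  | 0, _, tot => tot
  | k+1, pearls, tot =>
    match pearls with
    | i :: j :: rest =>
      let s := i + j
      let p := pearlsInsPos rest s
      pearlsLoopB k (rest.take p ++ [s] ++ rest.drop p) (tot + s)
    | _ => 0       -- pearls[0] / pearls[1]: IndexError, excluded by Pre_

def Pearls_alt (n : Int) (pearl_cost : List Int) : Int :=
  PySem.Int.mod
    (pearlsLoopB (n - 1).toNat (PySem.List.sorted pearl_cost (fun x => x) false) 0)
    (10 ^ 9 + 7)

-- ===== PRECONDITION & SPEC =====
-- Pre_ excludes exactly the inputs on which A raises IndexError (heap underflow: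
-- more than len(pearl_cost) - 1 merges requested); B raises IndexError there too.
def Pre_Pearls (n : Int) (pearl_cost : List Int) : Prop :=
  n ≤ 1 ∨ n ≤ (pearl_cost.length : Int)
instance (n : Int) (pearl_cost : List Int) : Decidable (Pre_Pearls n pearl_cost) := by
  unfold Pre_Pearls; infer_instance

def pvWitness_Pearls : Int × List Int := (3, [1, 2, 3])

def Spec_Pearls (n : Int) (pearl_cost : List Int) (out : Int) : Prop := out = Pearls_alt n pearl_cost
instance (n : Int) (pearl_cost : List Int) (out : Int) : Decidable (Spec_Pearls n pearl_cost out) := by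
  unfold Spec_Pearls; infer_instance

-- ===== CLAIM (what is proved, stated in full; the proofs are below) =====
def Claim_equal_Pearls : Prop := ∀ (n : Int) (pearl_cost : List Int), Dom_Pearls n pearl_cost → Pre_Pearls n pearl_cost → Spec_Pearls n pearl_cost (Pearls n pearl_cost)

-- ===== LEMMAS AND PROOFS =====

-- the splice 'rest[:k] + [s] + rest[k:]' at the scan position IS ordered insertion
theorem pearls_splice_eq_orderedInsert (s : Int) (xs : List Int) :
    xs.take (pearlsInsPos xs s) ++ [s] ++ xs.drop (pearlsInsPos xs s)
      = List.orderedInsert (· ≤ ·) s xs := by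
  induction xs with
  | nil => rfl
  | cons x r ih =>
    by_cases h : x < s
    · simp [pearlsInsPos, List.orderedInsert, h, not_le.mpr h, ← ih]
    · simp [pearlsInsPos, List.orderedInsert, h, not_lt.mp h]

-- a list permuting a sorted list headed by i has minimum i
theorem pearls_min?_of_perm_sorted {heap l : List Int} {i : Int}
    (hp : heap.Perm (i :: l)) (hs : (i :: l).Pairwise (· ≤ ·)) :
    heap.min? = some i := by
  rw [List.min?_eq_some_iff]
  constructor
  · exact hp.mem_iff.mpr (by simp)
  · intro b hb
    have hb' : b ∈ i :: l := hp.mem_iff.mp hb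
    rcases List.mem_cons.mp hb' with h | h
    · exact le_of_eq h.symm
    · exact (List.pairwise_cons.mp hs).1 b h

-- main loop equivalence: A's heap (as a multiset) against B's sorted list
theorem pearls_loop_eq (k : Nat) : ∀ (heap l : List Int) (acc : Int),
    l.Pairwise (· ≤ ·) → heap.Perm l → (k = 0 ∨ k + 1 ≤ l.length) →
    pearlsLoopA k heap acc = pearlsLoopB k l acc := by
  induction k with
  | zero => intro heap l acc _ _ _; rfl
  | succ k ih =>
    intro heap l acc hs hp hlen
    have hlen2 : k + 2 ≤ l.length := by omega
    match l, hs, hp, hlen2 with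
    | i :: j :: rest, hs, hp, hlen2 =>
      have hmin1 : heap.min? = some i := pearls_min?_of_perm_sorted hp hs
      have hs1 : (j :: rest).Pairwise (· ≤ ·) := (List.pairwise_cons.mp hs).2
      have hp1 : (heap.erase i).Perm (j :: rest) := by
        have := hp.erase i
        rwa [List.erase_cons_head] at this
      have hmin2 : (heap.erase i).min? = some j := pearls_min?_of_perm_sorted hp1 hs1
      have hp2 : ((heap.erase i).erase j).Perm rest := by
        have := hp1.erase j
        rwa [List.erase_cons_head] at this
      have hstep : pearlsLoopA (k + 1) heap acc
          = pearlsLoopA k ((i + j) :: (heap.erase i).erase j) (acc + i + j) := by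
        simp [pearlsLoopA, pearlsPopMin, hmin1, hmin2]
      rw [hstep]
      have hrest : rest.Pairwise (· ≤ ·) := (List.pairwise_cons.mp hs1).2
      have hsorted' : (List.orderedInsert (· ≤ ·) (i + j) rest).Pairwise (· ≤ ·) :=
        List.Pairwise.orderedInsert (i + j) rest hrest
      have hperm' : ((i + j) :: (heap.erase i).erase j).Perm
          (List.orderedInsert (· ≤ ·) (i + j) rest) :=
        (hp2.cons (i + j)).trans (List.perm_orderedInsert _ _ _).symm
      have hlen' : k = 0 ∨ k + 1 ≤ (List.orderedInsert (· ≤ ·) (i + j) rest).length := by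
        right
        have : (List.orderedInsert (· ≤ ·) (i + j) rest).length = rest.length + 1 :=
          (List.perm_orderedInsert _ _ _).length_eq
        simp at hlen2
        omega
      have := ih ((i + j) :: (heap.erase i).erase j)
        (List.orderedInsert (· ≤ ·) (i + j) rest) (acc + i + j) hsorted' hperm' hlen'
      rw [this]
      show pearlsLoopB k _ _ = pearlsLoopB (k + 1) (i :: j :: rest) acc
      simp only [pearlsLoopB, ← pearls_splice_eq_orderedInsert, add_assoc]

-- ===== VERDICT (by name: the statement is the Claim_ definition above) =====
theorem Pearls_spec : Claim_equal_Pearls := by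
  intro n pc _hdom hpre
  unfold Pre_Pearls at hpre
  unfold Spec_Pearls Pearls Pearls_alt
  congr 1
  apply pearls_loop_eq
  · have := PySem.List.sorted_pairwise pc (fun x => x) 
    simpa using this
  · exact (PySem.List.sorted_perm pc (fun x => x) false).symm
  · have hlen : (PySem.List.sorted pc (fun x => x) false).length = pc.length :=
      (PySem.List.sorted_perm pc (fun x => x) false).length_eq
    rw [hlen]
    omega
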